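-- pv_equiv track=rewrite | github.com/szaboeman/adventOfCode2015python | day15/day15.py | solvedAB
-- ===== SOURCE A (Python) =====
-- def solvedAB(data):
--     values=[]
--     maxvalue=0
--     for i in range(1,100-2):
--         for j in range(1,100-i-1):
--             for k in range(1,100-i-j):
--                 l=100-i-j-k
--                 sz=1
--                 for m in range(0,4):
--                     v=(int(data[0][m])*i+int(data[1][m])*j+int(data[2][m])*k+int(data[3][m])*l)
--                     if (v<0):
--                         sz=sz*0
--                     else:
--                         sz=sz*v
--                 values.append(sz)
--                 if (int(data[0][4])*i+int(data[1][4])*j+int(data[2][4])*k+int(data[3][4])*l==500):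
--                     if (maxvalue<sz):
--                         maxvalue=sz
--     return(max(values),maxvalue)
-- ===== SOURCE B (Python) =====
-- def solvedAB(data):
--     # Distribute the 100 teaspoons recursively over the 4 ingredients (each >= 1),
--     # carrying the 5 partial linear-combination totals and running maxima instead of
--     # re-computing every property from scratch at each leaf and collecting all scores.
--     def rec(n_left, remaining, totals, best, bestcal):
--         row = data[4 - n_left]
--         if n_left == 1:
--             t = [tot + int(c) * remaining for tot, c in zip(totals, row)]
--             sz = 1
--             for v in t[:4]:
--                 sz *= 0 if v < 0 else v
--             best = max(best, sz)
--             if t[4] == 500: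
--                 bestcal = max(bestcal, sz)
--             return best, bestcal
--         for amt in range(1, remaining - n_left + 2):
--             best, bestcal = rec(n_left - 1, remaining - amt,
--                                 [tot + int(c) * amt for tot, c in zip(totals, row)],
--                                 best, bestcal)
--         return best, bestcal
--     return rec(4, 100, [0, 0, 0, 0, 0], 0, 0)
-- ===== Notes on version B (the rewrite author's own statement) =====
-- stated objective: alternative
-- what changed: Replaces A's hard-coded triple loop that appends every score to a list and takes max() at the end with a recursive distributor over the ingredient count (each ingredient gets >=1 teaspoon of the remaining budget) that keeps running maxima for the overall and the 500-calorie score, never materialising the score list.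
import Mathlib
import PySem

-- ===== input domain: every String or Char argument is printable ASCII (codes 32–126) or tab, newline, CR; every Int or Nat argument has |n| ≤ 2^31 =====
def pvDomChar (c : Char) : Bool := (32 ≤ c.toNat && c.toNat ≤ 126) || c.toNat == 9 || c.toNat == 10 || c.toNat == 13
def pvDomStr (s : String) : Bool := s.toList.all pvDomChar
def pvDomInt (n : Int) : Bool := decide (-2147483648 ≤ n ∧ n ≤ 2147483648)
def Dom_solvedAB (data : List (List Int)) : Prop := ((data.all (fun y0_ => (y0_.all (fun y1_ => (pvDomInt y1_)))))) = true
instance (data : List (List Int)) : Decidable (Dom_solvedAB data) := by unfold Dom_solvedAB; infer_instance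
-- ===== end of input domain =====

-- B replaces A's fixed triple loop (which appends every score to a list and takes max() at
-- the end) with a recursive distributor over the ingredient count carrying partial totals
-- and running maxima (objective: alternative decomposition, same cost).

-- ===== PORT A =====
-- data[r][m]: r and m are always ≥ 0 in this program (literals and range(0,4) values),
-- where List.getD coincides with PySem.List.pyGetD (lemma PySem.List.pyGetD_ofNat');
-- the out-of-range inputs (Python IndexError) are excluded by Pre_solvedAB.
def pvRowA (data : List (List Int)) (r m : Int) : Int :=
  (data.getD r.toNat []).getD m.toNat 0

def solvedAB (data : List (List Int)) : Int × Int :=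
  let st :=
    (PySem.List.pyRange 1 (100 - 2) 1).foldl (fun s i =>
      (PySem.List.pyRange 1 (100 - i - 1) 1).foldl (fun s j =>
        (PySem.List.pyRange 1 (100 - i - j) 1).foldl (fun s k =>
          let l := 100 - i - j - k
          let sz := (PySem.List.pyRange 0 4 1).foldl (fun sz m =>
            let v := pvRowA data 0 m * i + pvRowA data 1 m * j +
                     pvRowA data 2 m * k + pvRowA data 3 m * l
            if v < 0 then sz * 0 else sz * v) 1
          let values := s.1.push sz   -- Python's O(1) values.append(sz)
          let maxvalue :=
            if pvRowA data 0 4 * i + pvRowA data 1 4 * j +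
               pvRowA data 2 4 * k + pvRowA data 3 4 * l = 500 then
              (if s.2 < sz then sz else s.2)
            else s.2
          (values, maxvalue)) s) s) ((#[] : Array Int), (0 : Int))
  -- max(values): values is never empty (the loop bounds are fixed), so the default is unreachable
  ((PySem.List.max? st.1.toList (fun y => y)).getD 0, st.2)

-- ===== PORT B =====
def pvRecB (data : List (List Int)) : Nat → Int → List Int → Int → Int → Int × Int
  | 0, _, _, best, bestcal => (best, bestcal)  -- totality guard: Python's rec is only called with n_left ≥ 1
  | 1, remaining, totals, best, bestcal =>
      let row := PySem.List.pyGetD data (4 - (1 : Int)) []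
      let t := (totals.zip row).map (fun q => q.1 + q.2 * remaining)
      let sz := (PySem.List.slice t none (some 4)).foldl
        (fun sz v => sz * (if v < 0 then 0 else v)) 1
      let best := max best sz
      let bestcal := if PySem.List.pyGetD t 4 0 = 500 then max bestcal sz else bestcal
      (best, bestcal)
  | n + 2, remaining, totals, best, bestcal =>
      let row := PySem.List.pyGetD data (4 - ((n : Int) + 2)) []
      (PySem.List.pyRange 1 (remaining - ((n : Int) + 2) + 2) 1).foldl
        (fun p amt => pvRecB data (n + 1) (remaining - amt)
          ((totals.zip row).map (fun q => q.1 + q.2 * amt)) p.1 p.2)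
        (best, bestcal)

def solvedAB_alt (data : List (List Int)) : Int × Int :=
  pvRecB data 4 100 [0, 0, 0, 0, 0] 0 0

-- ===== PRECONDITION & SPEC =====
-- Pre_: exactly the inputs on which A's indexing data[0..3][0..4] raises no IndexError
def Pre_solvedAB (data : List (List Int)) : Prop :=
  4 ≤ data.length ∧ ∀ row ∈ data.take 4, 5 ≤ row.length
instance (data : List (List Int)) : Decidable (Pre_solvedAB data) := by
  unfold Pre_solvedAB; infer_instance
def pvWitness_solvedAB : List (List Int) :=
  [[1, 0, 0, 0, 5], [0, 1, 0, 0, 5], [0, 0, 1, 0, 5], [0, 0, 0, 1, 5]]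

def Spec_solvedAB (data : List (List Int)) (out : Int × Int) : Prop := out = solvedAB_alt data
instance (data : List (List Int)) (out : Int × Int) : Decidable (Spec_solvedAB data out) := by unfold Spec_solvedAB; infer_instance

-- ===== CLAIM (what is proved, stated in full; the proofs are below) =====
def Claim_equal_solvedAB : Prop := ∀ (data : List (List Int)), Dom_solvedAB data → Pre_solvedAB data → Spec_solvedAB data (solvedAB data)

-- ===== LEMMAS AND PROOFS =====

-- the per-composition step of A's loop body, on state (values, maxvalue) as a List
def pvStepA (data : List (List Int)) (s : List Int × Int) (t : Int × Int × Int) : List Int × Int :=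
  let i := t.1; let j := t.2.1; let k := t.2.2
  let l := 100 - i - j - k
  let sz := (PySem.List.pyRange 0 4 1).foldl (fun sz m =>
    let v := pvRowA data 0 m * i + pvRowA data 1 m * j +
             pvRowA data 2 m * k + pvRowA data 3 m * l
    if v < 0 then sz * 0 else sz * v) 1
  (s.1 ++ [sz],
   if pvRowA data 0 4 * i + pvRowA data 1 4 * j +
      pvRowA data 2 4 * k + pvRowA data 3 4 * l = 500 then
     (if s.2 < sz then sz else s.2)
   else s.2)

-- the same step on state (values : Array Int, maxvalue), as the port itself runs it
def pvStepAArr (data : List (List Int)) (s : Array Int × Int) (t : Int × Int × Int) : Array Int × Int :=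
  let i := t.1; let j := t.2.1; let k := t.2.2
  let l := 100 - i - j - k
  let sz := (PySem.List.pyRange 0 4 1).foldl (fun sz m =>
    let v := pvRowA data 0 m * i + pvRowA data 1 m * j +
             pvRowA data 2 m * k + pvRowA data 3 m * l
    if v < 0 then sz * 0 else sz * v) 1
  (s.1.push sz,
   if pvRowA data 0 4 * i + pvRowA data 1 4 * j +
      pvRowA data 2 4 * k + pvRowA data 3 4 * l = 500 then
     (if s.2 < sz then sz else s.2)
   else s.2)

-- the per-composition step of B's recursion at a leaf, on state (best, bestcal),
-- for a 4×5 matrix given by its twenty entries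
def pvStepB (a0 a1 a2 a3 a4 b0 b1 b2 b3 b4 c0 c1 c2 c3 c4 d0 d1 d2 d3 d4 : Int)
    (p : Int × Int) (t : Int × Int × Int) : Int × Int :=
  let i := t.1; let j := t.2.1; let k := t.2.2
  let l := 100 - i - j - k
  let sz := [a0 * i + b0 * j + c0 * k + d0 * l,
             a1 * i + b1 * j + c1 * k + d1 * l,
             a2 * i + b2 * j + c2 * k + d2 * l,
             a3 * i + b3 * j + c3 * k + d3 * l].foldl
    (fun sz v => sz * (if v < 0 then 0 else v)) 1
  (max p.1 sz,
   if a4 * i + b4 * j + c4 * k + d4 * l = 500 then max p.2 sz else p.2)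

-- all compositions of 100 into 4 positive parts, first three coordinates, in loop order
def pvComps : List (Int × Int × Int) :=
  (PySem.List.pyRange 1 98 1).flatMap (fun i =>
    (PySem.List.pyRange 1 (100 - i - 1) 1).flatMap (fun j =>
      (PySem.List.pyRange 1 (100 - i - j) 1).map (fun k => (i, j, k))))

theorem pv_foldl_flatMap {α β σ : Type} (g : β → List α) (f : σ → α → σ) :
    ∀ (xs : List β) (s : σ),
      (xs.flatMap g).foldl f s = xs.foldl (fun s b => (g b).foldl f s) s := by
  intro xs
  induction xs with
  | nil => intro s; rfl
  | cons x xs ih => intro s; simp [List.flatMap_cons, List.foldl_append, ih]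

theorem pv_foldl_congr {α σ : Type} {f g : σ → α → σ} (h : ∀ s a, f s a = g s a) :
    ∀ (l : List α) (s : σ), l.foldl f s = l.foldl g s := by
  intro l
  induction l with
  | nil => intro s; rfl
  | cons x t ih => intro s; simp only [List.foldl_cons, h, ih]

theorem pvA_fold (data : List (List Int)) :
    (PySem.List.pyRange 1 (100 - 2) 1).foldl (fun s i =>
        (PySem.List.pyRange 1 (100 - i - 1) 1).foldl (fun s j =>
          (PySem.List.pyRange 1 (100 - i - j) 1).foldl
            (fun s k => pvStepAArr data s (i, j, k)) s) s)
      ((#[] : Array Int), (0 : Int)) =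
      pvComps.foldl (pvStepAArr data) (#[], 0) := by
  unfold pvComps
  rw [pv_foldl_flatMap, show (100 : Int) - 2 = 98 from by norm_num]
  refine pv_foldl_congr (fun s i => ?_) _ _
  rw [pv_foldl_flatMap]
  refine pv_foldl_congr (fun s j => ?_) _ _
  rw [List.foldl_map]

theorem pvStepA_toList (data : List (List Int)) (a : Array Int) (mv : Int) (t : Int × Int × Int) :
    pvStepA data (a.toList, mv) t =
      ((pvStepAArr data (a, mv) t).1.toList, (pvStepAArr data (a, mv) t).2) := by
  simp [pvStepA, pvStepAArr]

theorem pvA_arr_list (data : List (List Int)) :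
    ∀ (l : List (Int × Int × Int)) (a : Array Int) (mv : Int),
      l.foldl (pvStepA data) (a.toList, mv) =
        ((l.foldl (pvStepAArr data) (a, mv)).1.toList,
          (l.foldl (pvStepAArr data) (a, mv)).2) := by
  intro l
  induction l with
  | nil => intro a mv; rfl
  | cons t l ih =>
    intro a mv
    simp only [List.foldl_cons, pvStepA_toList]
    exact ih (pvStepAArr data (a, mv) t).1 (pvStepAArr data (a, mv) t).2

theorem pvA_flat (data : List (List Int)) :
    solvedAB data =
      ((PySem.List.max? (pvComps.foldl (pvStepA data) ([], 0)).1 (fun y => y)).getD 0,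
        (pvComps.foldl (pvStepA data) ([], 0)).2) := by
  have harr : solvedAB data =
      ((PySem.List.max? (pvComps.foldl (pvStepAArr data) (#[], 0)).1.toList (fun y => y)).getD 0,
        (pvComps.foldl (pvStepAArr data) (#[], 0)).2) := by
    rw [← pvA_fold data]
    rfl
  rw [harr]
  have h := pvA_arr_list data pvComps #[] 0
  simp only at h
  rw [h]

theorem pvB_leaf (a0 a1 a2 a3 a4 b0 b1 b2 b3 b4 c0 c1 c2 c3 c4 d0 d1 d2 d3 d4 : Int)
    (ta tb tc td : List Int) (rest : List (List Int))
    (u0 u1 u2 u3 u4 R b bc : Int) :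
    pvRecB ((a0::a1::a2::a3::a4::ta)::(b0::b1::b2::b3::b4::tb)::(c0::c1::c2::c3::c4::tc)::
            (d0::d1::d2::d3::d4::td)::rest) 1 R [u0, u1, u2, u3, u4] b bc =
      (max b ([u0 + d0 * R, u1 + d1 * R, u2 + d2 * R, u3 + d3 * R].foldl
          (fun sz v => sz * (if v < 0 then 0 else v)) 1),
       if u4 + d4 * R = 500 then
         max bc ([u0 + d0 * R, u1 + d1 * R, u2 + d2 * R, u3 + d3 * R].foldl
           (fun sz v => sz * (if v < 0 then 0 else v)) 1)
       else bc) := by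
  simp only [pvRecB]
  norm_num [PySem.List.pyGetD_ofNat', List.getD, List.zip_cons_cons, List.map_cons,
    PySem.List.slice_to, show Int.toNat 4 = 4 from by decide,
    List.take_succ_cons, List.take_zero]

theorem pvB2 (a0 a1 a2 a3 a4 b0 b1 b2 b3 b4 c0 c1 c2 c3 c4 d0 d1 d2 d3 d4 : Int)
    (ta tb tc td : List Int) (rest : List (List Int)) (i j b bc : Int) :
    pvRecB ((a0::a1::a2::a3::a4::ta)::(b0::b1::b2::b3::b4::tb)::(c0::c1::c2::c3::c4::tc)::
            (d0::d1::d2::d3::d4::td)::rest) 2 (100 - i - j)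
        [a0 * i + b0 * j, a1 * i + b1 * j, a2 * i + b2 * j, a3 * i + b3 * j, a4 * i + b4 * j]
        b bc =
      (PySem.List.pyRange 1 (100 - i - j) 1).foldl
        (fun p k => pvStepB a0 a1 a2 a3 a4 b0 b1 b2 b3 b4 c0 c1 c2 c3 c4 d0 d1 d2 d3 d4
          p (i, j, k)) (b, bc) := by
  rw [pvRecB]
  norm_num [pvStepB, pvB_leaf, PySem.List.pyGetD_ofNat', List.getD, List.zip_cons_cons,
    List.map_cons]

theorem pvB3 (a0 a1 a2 a3 a4 b0 b1 b2 b3 b4 c0 c1 c2 c3 c4 d0 d1 d2 d3 d4 : Int)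
    (ta tb tc td : List Int) (rest : List (List Int)) (i b bc : Int) :
    pvRecB ((a0::a1::a2::a3::a4::ta)::(b0::b1::b2::b3::b4::tb)::(c0::c1::c2::c3::c4::tc)::
            (d0::d1::d2::d3::d4::td)::rest) 3 (100 - i)
        [a0 * i, a1 * i, a2 * i, a3 * i, a4 * i] b bc =
      (PySem.List.pyRange 1 (100 - i - 1) 1).foldl
        (fun p j => pvRecB ((a0::a1::a2::a3::a4::ta)::(b0::b1::b2::b3::b4::tb)::
            (c0::c1::c2::c3::c4::tc)::(d0::d1::d2::d3::d4::td)::rest) 2 (100 - i - j)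
          [a0 * i + b0 * j, a1 * i + b1 * j, a2 * i + b2 * j, a3 * i + b3 * j,
           a4 * i + b4 * j] p.1 p.2) (b, bc) := by
  rw [pvRecB]
  norm_num [PySem.List.pyGetD_ofNat', List.getD, List.zip_cons_cons, List.map_cons]
  rw [show (100 : Int) - i - 3 + 2 = 100 - i - 1 from by ring]

theorem pvB_flat (a0 a1 a2 a3 a4 b0 b1 b2 b3 b4 c0 c1 c2 c3 c4 d0 d1 d2 d3 d4 : Int)
    (ta tb tc td : List Int) (rest : List (List Int)) :
    solvedAB_alt ((a0::a1::a2::a3::a4::ta)::(b0::b1::b2::b3::b4::tb)::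
        (c0::c1::c2::c3::c4::tc)::(d0::d1::d2::d3::d4::td)::rest) =
      pvComps.foldl
        (pvStepB a0 a1 a2 a3 a4 b0 b1 b2 b3 b4 c0 c1 c2 c3 c4 d0 d1 d2 d3 d4) (0, 0) := by
  unfold solvedAB_alt
  rw [pvRecB]
  norm_num [PySem.List.pyGetD_ofNat', PySem.List.pyGetD_zero, List.getD,
    List.zip_cons_cons, List.map_cons]
  unfold pvComps
  rw [pv_foldl_flatMap]
  refine pv_foldl_congr (fun p i => ?_) _ _
  rw [pvB3, pv_foldl_flatMap]
  refine pv_foldl_congr (fun q j => ?_) _ _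
  rw [List.foldl_map, pvB2]

theorem pv_sz_eq (a0 a1 a2 a3 a4 b0 b1 b2 b3 b4 c0 c1 c2 c3 c4 d0 d1 d2 d3 d4 : Int)
    (ta tb tc td : List Int) (rest : List (List Int)) (i j k : Int) :
    ([a0 * i + b0 * j + c0 * k + d0 * (100 - i - j - k),
      a1 * i + b1 * j + c1 * k + d1 * (100 - i - j - k),
      a2 * i + b2 * j + c2 * k + d2 * (100 - i - j - k),
      a3 * i + b3 * j + c3 * k + d3 * (100 - i - j - k)].foldl
        (fun sz v => sz * (if v < 0 then 0 else v)) 1) =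
      (PySem.List.pyRange 0 4 1).foldl (fun sz m =>
        let v := pvRowA ((a0::a1::a2::a3::a4::ta)::(b0::b1::b2::b3::b4::tb)::
                   (c0::c1::c2::c3::c4::tc)::(d0::d1::d2::d3::d4::td)::rest) 0 m * i +
                 pvRowA ((a0::a1::a2::a3::a4::ta)::(b0::b1::b2::b3::b4::tb)::
                   (c0::c1::c2::c3::c4::tc)::(d0::d1::d2::d3::d4::td)::rest) 1 m * j +
                 pvRowA ((a0::a1::a2::a3::a4::ta)::(b0::b1::b2::b3::b4::tb)::
                   (c0::c1::c2::c3::c4::tc)::(d0::d1::d2::d3::d4::td)::rest) 2 m * k +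
                 pvRowA ((a0::a1::a2::a3::a4::ta)::(b0::b1::b2::b3::b4::tb)::
                   (c0::c1::c2::c3::c4::tc)::(d0::d1::d2::d3::d4::td)::rest) 3 m *
                   (100 - i - j - k)
        if v < 0 then sz * 0 else sz * v) 1 := by
  simp only [show PySem.List.pyRange 0 4 1 = [0, 1, 2, 3] from by decide,
    List.foldl_cons, List.foldl_nil, pvRowA]
  simp [List.getD, mul_ite, ite_mul, mul_zero, zero_mul, one_mul]

theorem pv_cal_eq (a0 a1 a2 a3 a4 b0 b1 b2 b3 b4 c0 c1 c2 c3 c4 d0 d1 d2 d3 d4 : Int)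
    (ta tb tc td : List Int) (rest : List (List Int)) (i j k : Int) :
    pvRowA ((a0::a1::a2::a3::a4::ta)::(b0::b1::b2::b3::b4::tb)::
        (c0::c1::c2::c3::c4::tc)::(d0::d1::d2::d3::d4::td)::rest) 0 4 * i +
      pvRowA ((a0::a1::a2::a3::a4::ta)::(b0::b1::b2::b3::b4::tb)::
        (c0::c1::c2::c3::c4::tc)::(d0::d1::d2::d3::d4::td)::rest) 1 4 * j +
      pvRowA ((a0::a1::a2::a3::a4::ta)::(b0::b1::b2::b3::b4::tb)::
        (c0::c1::c2::c3::c4::tc)::(d0::d1::d2::d3::d4::td)::rest) 2 4 * k +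
      pvRowA ((a0::a1::a2::a3::a4::ta)::(b0::b1::b2::b3::b4::tb)::
        (c0::c1::c2::c3::c4::tc)::(d0::d1::d2::d3::d4::td)::rest) 3 4 *
        (100 - i - j - k) =
      a4 * i + b4 * j + c4 * k + d4 * (100 - i - j - k) := by
  simp [pvRowA, List.getD]

theorem pv_clamp2_nonneg :
    ∀ (l : List Int) (s : Int), 0 ≤ s →
      0 ≤ l.foldl (fun sz v => sz * (if v < 0 then 0 else v)) s := by
  intro l
  induction l with
  | nil => intro s hs; exact hs
  | cons x l ih =>
    intro s hs
    simp only [List.foldl_cons]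
    exact ih _ (mul_nonneg hs (by split_ifs with h <;> omega))

theorem pv_main (a0 a1 a2 a3 a4 b0 b1 b2 b3 b4 c0 c1 c2 c3 c4 d0 d1 d2 d3 d4 : Int)
    (ta tb tc td : List Int) (rest : List (List Int)) :
    ∀ (l : List (Int × Int × Int)) (vals : List Int) (mv : Int),
      (∀ x ∈ vals, 0 ≤ x) →
      l.foldl (pvStepB a0 a1 a2 a3 a4 b0 b1 b2 b3 b4 c0 c1 c2 c3 c4 d0 d1 d2 d3 d4)
          (vals.foldl max 0, mv) =
          ((l.foldl (pvStepA ((a0::a1::a2::a3::a4::ta)::(b0::b1::b2::b3::b4::tb)::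
              (c0::c1::c2::c3::c4::tc)::(d0::d1::d2::d3::d4::td)::rest)) (vals, mv)).1.foldl max 0,
            (l.foldl (pvStepA ((a0::a1::a2::a3::a4::ta)::(b0::b1::b2::b3::b4::tb)::
              (c0::c1::c2::c3::c4::tc)::(d0::d1::d2::d3::d4::td)::rest)) (vals, mv)).2) ∧
        ∀ x ∈ (l.foldl (pvStepA ((a0::a1::a2::a3::a4::ta)::(b0::b1::b2::b3::b4::tb)::
            (c0::c1::c2::c3::c4::tc)::(d0::d1::d2::d3::d4::td)::rest)) (vals, mv)).1, 0 ≤ x := by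
  intro l
  induction l with
  | nil => intro vals mv h; exact ⟨rfl, h⟩
  | cons t l ih =>
    intro vals mv h
    obtain ⟨i, j, k⟩ := t
    simp only [List.foldl_cons]
    set sz := ([a0 * i + b0 * j + c0 * k + d0 * (100 - i - j - k),
      a1 * i + b1 * j + c1 * k + d1 * (100 - i - j - k),
      a2 * i + b2 * j + c2 * k + d2 * (100 - i - j - k),
      a3 * i + b3 * j + c3 * k + d3 * (100 - i - j - k)].foldl
        (fun sz v => sz * (if v < 0 then 0 else v)) 1) with hszdef
    have hsz : 0 ≤ sz := pv_clamp2_nonneg _ 1 (by norm_num)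
    have hstepA : pvStepA ((a0::a1::a2::a3::a4::ta)::(b0::b1::b2::b3::b4::tb)::
        (c0::c1::c2::c3::c4::tc)::(d0::d1::d2::d3::d4::td)::rest) (vals, mv) (i, j, k) =
        (vals ++ [sz],
         if a4 * i + b4 * j + c4 * k + d4 * (100 - i - j - k) = 500 then
           (if mv < sz then sz else mv)
         else mv) := by
      show (vals ++ [_], if _ = 500 then (if mv < _ then _ else mv) else mv) = _
      rw [hszdef, pv_sz_eq a0 a1 a2 a3 a4 b0 b1 b2 b3 b4 c0 c1 c2 c3 c4 d0 d1 d2 d3 d4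
        ta tb tc td rest i j k,
        pv_cal_eq a0 a1 a2 a3 a4 b0 b1 b2 b3 b4 c0 c1 c2 c3 c4 d0 d1 d2 d3 d4
        ta tb tc td rest i j k]
    have hstepB : pvStepB a0 a1 a2 a3 a4 b0 b1 b2 b3 b4 c0 c1 c2 c3 c4 d0 d1 d2 d3 d4
        (vals.foldl max 0, mv) (i, j, k) =
        ((vals ++ [sz]).foldl max 0,
         if a4 * i + b4 * j + c4 * k + d4 * (100 - i - j - k) = 500 then
           (if mv < sz then sz else mv)
         else mv) := by
      show (max (vals.foldl max 0) sz, if _ = 500 then max mv sz else mv) = _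
      rw [List.foldl_append]
      simp only [List.foldl_cons, List.foldl_nil]
      congr 1
      by_cases h1 : a4 * i + b4 * j + c4 * k + d4 * (100 - i - j - k) = 500
      · rw [if_pos h1, if_pos h1]
        rcases lt_or_ge mv sz with h2 | h2
        · rw [if_pos h2, max_eq_right (le_of_lt h2)]
        · rw [if_neg (not_lt.mpr h2), max_eq_left h2]
      · rw [if_neg h1, if_neg h1]
    rw [hstepA, hstepB]
    exact ih (vals ++ [sz]) _ (by
      intro x hx
      rcases List.mem_append.mp hx with hx | hx
      · exact h x hx
      · simp only [List.mem_singleton] at hx; omega)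

theorem pv_max_getD (vals : List Int) (h : ∀ x ∈ vals, 0 ≤ x) :
    (PySem.List.max? vals (fun y => y)).getD 0 = vals.foldl max 0 := by
  cases vals with
  | nil => simp [PySem.List.max?]
  | cons x t =>
    rw [PySem.List.max?_id_cons]
    simp only [Option.getD_some, List.foldl_cons]
    rw [max_eq_right (h x (List.mem_cons_self))]

theorem pv_core (a0 a1 a2 a3 a4 b0 b1 b2 b3 b4 c0 c1 c2 c3 c4 d0 d1 d2 d3 d4 : Int)
    (ta tb tc td : List Int) (rest : List (List Int)) :
    solvedAB ((a0::a1::a2::a3::a4::ta)::(b0::b1::b2::b3::b4::tb)::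
        (c0::c1::c2::c3::c4::tc)::(d0::d1::d2::d3::d4::td)::rest) =
      solvedAB_alt ((a0::a1::a2::a3::a4::ta)::(b0::b1::b2::b3::b4::tb)::
        (c0::c1::c2::c3::c4::tc)::(d0::d1::d2::d3::d4::td)::rest) := by
  rw [pvA_flat, pvB_flat]
  have hmain := pv_main a0 a1 a2 a3 a4 b0 b1 b2 b3 b4 c0 c1 c2 c3 c4 d0 d1 d2 d3 d4
    ta tb tc td rest pvComps [] 0 (by intro x hx; cases hx)
  have h0 : ([] : List Int).foldl max 0 = 0 := rfl
  rw [h0] at hmain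
  rw [hmain.1, pv_max_getD _ hmain.2]

-- ===== VERDICT (by name: the statement is the Claim_ definition above) =====
theorem solvedAB_spec : Claim_equal_solvedAB := by
  intro data _ hpre
  unfold Spec_solvedAB
  obtain ⟨hlen, hrows⟩ := hpre
  rcases data with _ | ⟨r0, data⟩; · simp at hlen
  rcases data with _ | ⟨r1, data⟩; · simp at hlen
  rcases data with _ | ⟨r2, data⟩; · simp at hlen
  rcases data with _ | ⟨r3, data⟩; · simp at hlen
  have h0 : 5 ≤ r0.length := hrows r0 (by simp)
  have h1 : 5 ≤ r1.length := hrows r1 (by simp)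
  have h2 : 5 ≤ r2.length := hrows r2 (by simp)
  have h3 : 5 ≤ r3.length := hrows r3 (by simp)
  clear hrows hlen
  rcases r0 with _ | ⟨a0, r0⟩; · simp at h0
  rcases r0 with _ | ⟨a1, r0⟩; · simp at h0
  rcases r0 with _ | ⟨a2, r0⟩; · simp at h0
  rcases r0 with _ | ⟨a3, r0⟩; · simp at h0
  rcases r0 with _ | ⟨a4, r0⟩; · simp at h0
  rcases r1 with _ | ⟨b0, r1⟩; · simp at h1
  rcases r1 with _ | ⟨b1, r1⟩; · simp at h1
  rcases r1 with _ | ⟨b2, r1⟩; · simp at h1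
  rcases r1 with _ | ⟨b3, r1⟩; · simp at h1
  rcases r1 with _ | ⟨b4, r1⟩; · simp at h1
  rcases r2 with _ | ⟨c0, r2⟩; · simp at h2
  rcases r2 with _ | ⟨c1, r2⟩; · simp at h2
  rcases r2 with _ | ⟨c2, r2⟩; · simp at h2
  rcases r2 with _ | ⟨c3, r2⟩; · simp at h2
  rcases r2 with _ | ⟨c4, r2⟩; · simp at h2
  rcases r3 with _ | ⟨d0, r3⟩; · simp at h3
  rcases r3 with _ | ⟨d1, r3⟩; · simp at h3
  rcases r3 with _ | ⟨d2, r3⟩; · simp at h3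
  rcases r3 with _ | ⟨d3, r3⟩; · simp at h3
  rcases r3 with _ | ⟨d4, r3⟩; · simp at h3
  exact pv_core a0 a1 a2 a3 a4 b0 b1 b2 b3 b4 c0 c1 c2 c3 c4 d0 d1 d2 d3 d4 r0 r1 r2 r3 data
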